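-- pv_equiv track=rewrite | github.com/MateuszDobijaPhD/2024ScientificComputingWithPython | classes_4/homework/exercise_4_2.py | reverse_range_recursively
-- ===== SOURCE A (Python) =====
-- def reverse_range_recursively(L, left, right):
--     tmp = L[left]
--     L[left] = L[right]
--     L[right] = tmp
--     left += 1
--     right -= 1
--
--     if left < right:
--         return reverse_range_recursively(L, left, right)
--     return L
-- ===== SOURCE B (Python) =====
-- def reverse_range_recursively(L, left, right):
--     while left < right:
--         L[left], L[right] = L[right], L[left]
--         left += 1
--         right -= 1
--     return L
-- ===== Notes on version B (the rewrite author's own statement) =====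
-- stated objective: idiomatic
-- what changed: Replaces A's tail recursion (which swaps unconditionally before testing) with the standard iterative two-pointer reversal: a while left < right loop that swaps and moves the pointers inward.
-- intended difference: On calls with left > right (an empty range) where L[left] != L[right], A still performs one swap and returns the list with those two elements exchanged, while B returns L unchanged, which is the intended result of reversing an empty range. — e.g. on reverse_range_recursively([1, 2], 1, 0): A returns [2, 1], B returns [1, 2]
import Mathlib
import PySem

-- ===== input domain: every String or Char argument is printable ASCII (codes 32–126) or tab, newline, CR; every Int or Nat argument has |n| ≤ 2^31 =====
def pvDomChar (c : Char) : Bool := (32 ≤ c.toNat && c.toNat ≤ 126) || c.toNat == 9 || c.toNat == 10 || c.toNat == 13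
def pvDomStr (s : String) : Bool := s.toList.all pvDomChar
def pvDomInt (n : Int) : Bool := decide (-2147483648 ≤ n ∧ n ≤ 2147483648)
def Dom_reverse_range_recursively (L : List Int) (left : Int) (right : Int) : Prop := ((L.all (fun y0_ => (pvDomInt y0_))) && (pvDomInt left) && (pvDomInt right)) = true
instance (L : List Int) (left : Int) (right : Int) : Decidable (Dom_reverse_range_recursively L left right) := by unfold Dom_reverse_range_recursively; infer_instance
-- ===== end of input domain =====

-- B replaces A's recursion (swap first, test after) with the standard iterative two-pointer reversal
-- (while left < right: swap, move inward); both mutate L in Python, and on an empty range (left > right)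
-- B intentionally leaves L unchanged where A still swaps once (see D_ below); equivalence is about the
-- return value.

-- ===== PORT A =====
-- Literal port of A: unconditional swap (pyGetD/pySetD are exact on in-range indices, which Pre_
-- guarantees for every access), then recurse while left < right.  The recursion is expressed with a
-- fuel parameter (right - left).toNat, which is always sufficient: each call shrinks right - left by 2.
def pvAFuel (fuel : Nat) (L : List Int) (left right : Int) : List Int :=
    let tmp := PySem.List.pyGetD L left 0
    let L1 := PySem.List.pySetD L left (PySem.List.pyGetD L right 0)
    let L2 := PySem.List.pySetD L1 right tmp
    let left' := left + 1
    let right' := right - 1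
    if left' < right' then
      match fuel with
      | 0 => L2          -- unreachable: fuel ≥ (right - left).toNat ≥ 3 whenever left' < right'
      | f + 1 => pvAFuel f L2 left' right'
    else L2

def reverse_range_recursively (L : List Int) (left : Int) (right : Int) : List Int :=
  pvAFuel (right - left).toNat L left right

-- ===== PORT B =====
-- Port of Source B: while left < right: L[left], L[right] = L[right], L[left]; left += 1; right -= 1.
-- Same fuel discipline: (right - left).toNat steps always suffice.
def pvBFuel (fuel : Nat) (L : List Int) (left right : Int) : List Int :=
    if left < right then
      let x := PySem.List.pyGetD L right 0
      let y := PySem.List.pyGetD L left 0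
      let L' := PySem.List.pySetD (PySem.List.pySetD L left x) right y
      match fuel with
      | 0 => L'          -- unreachable: fuel ≥ (right - left).toNat ≥ 1 whenever left < right
      | f + 1 => pvBFuel f L' (left + 1) (right - 1)
    else L

def reverse_range_recursively_alt (L : List Int) (left : Int) (right : Int) : List Int :=
  pvBFuel (right - left).toNat L left right

-- ===== PRECONDITION & SPEC =====
-- Pre_ is exactly the set of inputs on which the Python A returns (elsewhere A raises IndexError):
-- every index left+k, right-k touched by the recursion lies in [-len L, len L).
def Pre_reverse_range_recursively (L : List Int) (left : Int) (right : Int) : Prop :=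
  -(L.length : Int) ≤ left ∧
  left + max 0 (PySem.Int.floordiv (right - left + 1) 2 - 1) < (L.length : Int) ∧
  -(L.length : Int) ≤ right - max 0 (PySem.Int.floordiv (right - left + 1) 2 - 1) ∧
  right < (L.length : Int)
instance (L : List Int) (left : Int) (right : Int) : Decidable (Pre_reverse_range_recursively L left right) := by
  unfold Pre_reverse_range_recursively; infer_instance

def pvWitness_reverse_range_recursively : List Int × Int × Int := ([1, 2, 3, 4], 0, 3)

-- On calls with left > right (an empty range) where L[left] ≠ L[right], A still performs one swap and
-- returns the list with those two elements exchanged, while B returns L unchanged, which is the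
-- intended result of reversing an empty range.
def D_reverse_range_recursively (L : List Int) (left : Int) (right : Int) : Prop :=
  left > right ∧ PySem.List.pyGetD L left 0 ≠ PySem.List.pyGetD L right 0
instance (L : List Int) (left : Int) (right : Int) : Decidable (D_reverse_range_recursively L left right) := by
  unfold D_reverse_range_recursively; infer_instance

def Spec_reverse_range_recursively (L : List Int) (left : Int) (right : Int) (out : List Int) : Prop :=
  ¬ D_reverse_range_recursively L left right → out = reverse_range_recursively_alt L left right
instance (L : List Int) (left : Int) (right : Int) (out : List Int) : Decidable (Spec_reverse_range_recursively L left right out) := by unfold Spec_reverse_range_recursively; infer_instance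

def pvDiffWitness_reverse_range_recursively : List Int × Int × Int := ([1, 2], 1, 0)
def pvDiffWitnessOut_reverse_range_recursively : (List Int) × (List Int) := ([2, 1], [1, 2])

-- ===== CLAIM (what is proved, stated in full; the proofs are below) =====
def Claim_unchanged_reverse_range_recursively : Prop := ∀ (L : List Int) (left : Int) (right : Int), Dom_reverse_range_recursively L left right → Pre_reverse_range_recursively L left right → Spec_reverse_range_recursively L left right (reverse_range_recursively L left right)
def Claim_changed_reverse_range_recursively : Prop := Dom_reverse_range_recursively (pvDiffWitness_reverse_range_recursively.1) (pvDiffWitness_reverse_range_recursively.2.1) (pvDiffWitness_reverse_range_recursively.2.2) ∧ Pre_reverse_range_recursively (pvDiffWitness_reverse_range_recursively.1) (pvDiffWitness_reverse_range_recursively.2.1) (pvDiffWitness_reverse_range_recursively.2.2) ∧ D_reverse_range_recursively (pvDiffWitness_reverse_range_recursively.1) (pvDiffWitness_reverse_range_recursively.2.1) (pvDiffWitness_reverse_range_recursively.2.2) ∧ reverse_range_recursively (pvDiffWitness_reverse_range_recursively.1) (pvDiffWitness_reverse_range_recursively.2.1) (pvDiffWitness_reverse_range_recursively.2.2) = pvDiffWitnessOut_reverse_range_recursively.1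 ∧ reverse_range_recursively_alt (pvDiffWitness_reverse_range_recursively.1) (pvDiffWitness_reverse_range_recursively.2.1) (pvDiffWitness_reverse_range_recursively.2.2) = pvDiffWitnessOut_reverse_range_recursively.2 ∧ pvDiffWitnessOut_reverse_range_recursively.1 ≠ pvDiffWitnessOut_reverse_range_recursively.2
def Claim_exact_reverse_range_recursively : Prop := ∀ (L : List Int) (left : Int) (right : Int), Dom_reverse_range_recursively L left right → Pre_reverse_range_recursively L left right → D_reverse_range_recursively L left right → reverse_range_recursively L left right ≠ reverse_range_recursively_alt L left right

-- ===== LEMMAS AND PROOFS =====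

-- Python's index normalisation for an in-range index i on a list of length n
def pvNidx (n : Nat) (i : Int) : Nat := if 0 ≤ i then i.toNat else n - (-i).toNat

theorem pvNidx_lt (n : Nat) (i : Int) (h : PySem.Raise.InRange n i) : pvNidx n i < n := by
  unfold PySem.Raise.InRange at h
  unfold pvNidx
  split <;> omega

theorem pvSetD_eq (L : List Int) (i : Int) (v : Int) (h : PySem.Raise.InRange L.length i) :
    PySem.List.pySetD L i v = L.set (pvNidx L.length i) v := by
  unfold PySem.Raise.InRange at h
  simp only [PySem.List.pySetD, PySem.List.pySet?, PySem.List.pyIdx?, pvNidx]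
  split <;> [skip; rw [if_pos (by omega)]] <;> simp_all

theorem pvGetD_eq (L : List Int) (i : Int) (d : Int) (h : PySem.Raise.InRange L.length i) :
    PySem.List.pyGetD L i d = L.getD (pvNidx L.length i) d := by
  unfold PySem.Raise.InRange at h
  simp only [PySem.List.pyGetD, PySem.List.pyGet?, PySem.List.pyIdx?, pvNidx]
  split <;> [skip; rw [if_pos (by omega)]] <;> simp_all

theorem pvSetD_self (L : List Int) (i : Int) (h : PySem.Raise.InRange L.length i) :
    PySem.List.pySetD L i (PySem.List.pyGetD L i 0) = L := by
  rw [pvSetD_eq L i _ h, pvGetD_eq L i 0 h]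
  have hk := pvNidx_lt L.length i h
  rw [List.getD_eq_getElem L 0 hk]
  exact List.set_getElem_self hk

-- the value both ports leave in the list after one swap at (l, r)
def pvSwapT (L : List Int) (l r : Int) : List Int :=
  PySem.List.pySetD (PySem.List.pySetD L l (PySem.List.pyGetD L r 0)) r (PySem.List.pyGetD L l 0)

theorem pvA_step (f : Nat) (L : List Int) (l r : Int) (h : l + 1 < r - 1) :
    pvAFuel (f + 1) L l r = pvAFuel f (pvSwapT L l r) (l + 1) (r - 1) := by
  rw [pvAFuel.eq_def, if_pos h]; rfl

theorem pvA_stop (fuel : Nat) (L : List Int) (l r : Int) (h : ¬ l + 1 < r - 1) :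
    pvAFuel fuel L l r = pvSwapT L l r := by
  rw [pvAFuel.eq_def, if_neg h]; rfl

theorem pvB_step (f : Nat) (L : List Int) (l r : Int) (h : l < r) :
    pvBFuel (f + 1) L l r = pvBFuel f (pvSwapT L l r) (l + 1) (r - 1) := by
  rw [pvBFuel.eq_def, if_pos h]; rfl

theorem pvB_stop (fuel : Nat) (L : List Int) (l r : Int) (h : ¬ l < r) :
    pvBFuel fuel L l r = L := by
  rw [pvBFuel.eq_def, if_neg h]

-- On a non-empty range (left < right) the two ports agree (under any sufficient fuels).
theorem pvAB_fuel (fuel : Nat) : ∀ (fuel' : Nat) (L : List Int) (l r : Int), l < r →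
    (r - l).toNat ≤ fuel → (r - l).toNat ≤ fuel' →
    pvAFuel fuel L l r = pvBFuel fuel' L l r := by
  induction fuel with
  | zero => intro fuel' L l r hlt hf _; omega
  | succ f ih =>
    intro fuel' L l r hlt hf hf'
    obtain ⟨f', rfl⟩ : ∃ f', fuel' = f' + 1 := ⟨fuel' - 1, by omega⟩
    by_cases h : l + 1 < r - 1
    · rw [pvA_step f L l r h, pvB_step f' L l r hlt,
        ih f' (pvSwapT L l r) (l + 1) (r - 1) h (by omega) (by omega)]
    · rw [pvA_stop (f + 1) L l r h, pvB_step f' L l r hlt,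
        pvB_stop f' (pvSwapT L l r) (l + 1) (r - 1) h]

-- ===== VERDICT (by name: the statement is the Claim_ definition above) =====
theorem reverse_range_recursively_spec : Claim_unchanged_reverse_range_recursively := by
  intro L l r _ hpre hnd
  by_cases hlt : l < r
  · exact pvAB_fuel (r - l).toNat (r - l).toNat L l r hlt le_rfl le_rfl
  · -- empty range: B returns L; A's single swap is a no-op because L[l] = L[r] outside D_
    have hm : PySem.Int.floordiv (r - l + 1) 2 ≤ 1 := by
      rw [PySem.Int.floordiv_eq_ediv_of_pos (by omega)]; omega
    obtain ⟨h1, h2, h3, h4⟩ := hpre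
    have hmax : max 0 (PySem.Int.floordiv (r - l + 1) 2 - 1) = 0 := by omega
    rw [hmax] at h2 h3
    have hl : PySem.Raise.InRange L.length l := ⟨h1, by omega⟩
    have hr : PySem.Raise.InRange L.length r := ⟨by omega, h4⟩
    have heq : PySem.List.pyGetD L l 0 = PySem.List.pyGetD L r 0 := by
      by_cases hlr : l = r
      · rw [hlr]
      · by_contra hne
        exact hnd ⟨by omega, hne⟩
    rw [reverse_range_recursively, reverse_range_recursively_alt,
      pvA_stop _ L l r (by omega), pvB_stop _ L l r hlt]
    unfold pvSwapT
    rw [← heq, pvSetD_self L l hl, heq, pvSetD_self L r hr]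

theorem reverse_range_recursively_changed : Claim_changed_reverse_range_recursively := by
  unfold Claim_changed_reverse_range_recursively
  refine ⟨by decide, by decide, by decide, ?_, ?_, by decide⟩
  · decide
  · decide

theorem reverse_range_recursively_tight : Claim_exact_reverse_range_recursively := by
  intro L l r _ hpre hd
  obtain ⟨hgt, hne⟩ := hd
  obtain ⟨h1, h2, h3, h4⟩ := hpre
  have hm : PySem.Int.floordiv (r - l + 1) 2 ≤ 0 := by
    rw [PySem.Int.floordiv_eq_ediv_of_pos (by omega)]; omega
  have hmax : max 0 (PySem.Int.floordiv (r - l + 1) 2 - 1) = 0 := by omega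
  rw [hmax] at h2 h3
  have hl : PySem.Raise.InRange L.length l := ⟨h1, by omega⟩
  have hr : PySem.Raise.InRange L.length r := ⟨by omega, h4⟩
  have hkl := pvNidx_lt L.length l hl
  have hkr := pvNidx_lt L.length r hr
  have hne' : L.getD (pvNidx L.length l) 0 ≠ L.getD (pvNidx L.length r) 0 := by
    rw [← pvGetD_eq L l 0 hl, ← pvGetD_eq L r 0 hr]; exact hne
  have hkne : pvNidx L.length r ≠ pvNidx L.length l := fun h => hne' (by rw [h])
  rw [reverse_range_recursively, reverse_range_recursively_alt,
    pvA_stop _ L l r (by omega), pvB_stop _ L l r (by omega)]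
  unfold pvSwapT
  intro hcontra
  rw [pvSetD_eq _ _ _ hl] at hcontra
  rw [pvSetD_eq _ _ _ (by simpa using hr)] at hcontra
  simp only [List.length_set] at hcontra
  have hp := congrArg (fun xs => xs[pvNidx L.length l]?) hcontra
  simp only [List.getElem?_set_ne hkne, List.getElem?_eq_getElem hkl] at hp
  rw [pvGetD_eq L r 0 hr, List.getD_eq_getElem L 0 hkr] at hp
  rw [List.getD_eq_getElem L 0 hkl, List.getD_eq_getElem L 0 hkr] at hne'
  simp only [List.getElem?_set, if_pos hkl, if_true, Option.some_inj] at hp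
  exact hne' hp.symm
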